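-- pv_equiv track=rewrite | github.com/MightySarabor/aveCaesar | segment.py | select_next_segment
-- ===== SOURCE A (Python) =====
-- def extract_track(segment_id):
--     """
--     Extrahiert aus einer Segment-ID (z. B. "segment-2-3" oder "start-and-goal-3")
--     die Track-Nummer als Integer.
--     """
--     if segment_id.startswith("segment-"):
--         parts = segment_id.split("-")
--         try:
--             return int(parts[1])
--         except:
--             return float('inf')
--     elif segment_id.startswith("start-and-goal-"):
--         parts = segment_id.split("-")
--         try:
--             return int(parts[2])
--         except:
--             return float('inf')
--     else:
--         return float('inf')
--
-- def select_next_segment(default_next, visible_str, field_status):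
--     """
--     Bestimmt das nächste Segment, an das der Token weitergereicht wird,
--     indem alle Kandidaten (default_next und jene aus visible_str) anhand
--     der Track-Nummer (niedrigste zuerst) ausgewählt werden und geprüft wird,
--     ob sie aktuell frei sind.
--
--     Parameter:
--       - default_next: Standardziel des Tokens (aus NEXT_SEGMENT)
--       - visible_str: Kommaseparierter String mit alternativen Segment-IDs
--       - field_status: Lokales Dictionary, das den Status der Felder enthält.
--
--     Rückgabe:
--       Die ausgewählte Segment-ID, falls ein freies Feld existiert, sonst None.
--     """
--     candidates = []
--     if default_next:
--         candidates.append(default_next)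
--     if visible_str:
--         for seg in visible_str.split(","):
--             seg = seg.strip()
--             if seg:
--                 candidates.append(seg)
--     # Entferne Duplikate
--     candidates = list(dict.fromkeys(candidates))
--     # Sortiere Kandidaten nach extrahierter Track-Nummer (niedrigste zuerst)
--     candidates.sort(key=lambda x: extract_track(x))
--     # Prüfe, ob der Kandidat frei ist (wenn nicht im Cache, gehen wir von "free" aus)
--     for candidate in candidates:
--         if field_status.get(candidate, "free") == "free":
--             return candidate
--     return None
-- ===== SOURCE B (Python) =====
-- def extract_track(segment_id):
--     """Extract the track number from a segment id; non-parsable ids sort last."""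
--     if segment_id.startswith("segment-"):
--         parts = segment_id.split("-")
--         try:
--             return int(parts[1])
--         except:
--             return float('inf')
--     elif segment_id.startswith("start-and-goal-"):
--         parts = segment_id.split("-")
--         try:
--             return int(parts[2])
--         except:
--             return float('inf')
--     else:
--         return float('inf')
--
-- def select_next_segment(default_next, visible_str, field_status):
--     """One linear pass over the deduped candidates instead of sort-then-scan:
--     keep the first free candidate with the strictly lowest track."""
--     candidates = []
--     if default_next:
--         candidates.append(default_next)
--     if visible_str:
--         for seg in visible_str.split(","):
--             seg = seg.strip()
--             if seg:
--                 candidates.append(seg)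
--     best = None
--     best_track = None
--     for candidate in dict.fromkeys(candidates):
--         if field_status.get(candidate, "free") == "free":
--             track = extract_track(candidate)
--             if best is None or track < best_track:
--                 best = candidate
--                 best_track = track
--     return best
-- ===== Notes on version B (the rewrite author's own statement) =====
-- stated objective: simpler
-- what changed: Replaces the sort-by-track-then-scan-for-first-free with a single linear pass over the deduped candidates that keeps the free candidate with the strictly lowest track (strict < reproduces the stable sort's earliest-position tie-break).
import Mathlib
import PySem

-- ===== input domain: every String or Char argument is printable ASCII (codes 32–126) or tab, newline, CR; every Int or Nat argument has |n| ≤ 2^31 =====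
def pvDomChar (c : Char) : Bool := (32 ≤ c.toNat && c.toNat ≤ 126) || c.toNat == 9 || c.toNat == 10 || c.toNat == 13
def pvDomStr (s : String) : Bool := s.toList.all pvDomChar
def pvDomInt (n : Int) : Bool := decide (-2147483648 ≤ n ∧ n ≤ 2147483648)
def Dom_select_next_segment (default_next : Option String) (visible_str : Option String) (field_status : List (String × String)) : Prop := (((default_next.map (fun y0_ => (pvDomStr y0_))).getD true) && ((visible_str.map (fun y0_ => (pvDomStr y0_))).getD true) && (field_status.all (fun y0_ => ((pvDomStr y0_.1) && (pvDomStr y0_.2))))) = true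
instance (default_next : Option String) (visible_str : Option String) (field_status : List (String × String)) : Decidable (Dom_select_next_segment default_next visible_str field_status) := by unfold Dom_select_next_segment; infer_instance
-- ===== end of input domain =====

-- B replaces A's sort-by-track-then-scan with one linear pass over the same deduped
-- candidates keeping the free candidate of strictly lowest track (simpler, no sort).


-- ===== PORT A =====
-- extract_track: returns the track as `some n`, with `none` standing for float('inf')
-- (the bare `except:` also catches the IndexError of parts[i], hence the pyGet? match).
def extract_track (segment_id : String) : Option Int :=
  if PySem.Str.startswith segment_id "segment-" then
    match PySem.List.pyGet? ((PySem.Str.split? segment_id "-").getD []) 1 with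
    | none => none
    | some p => PySem.Int.ofStr? p
  else if PySem.Str.startswith segment_id "start-and-goal-" then
    match PySem.List.pyGet? ((PySem.Str.split? segment_id "-").getD []) 2 with
    | none => none
    | some p => PySem.Int.ofStr? p
  else none

-- candidate building shared by both Pythons verbatim (append default_next if truthy,
-- then the stripped non-empty comma pieces of visible_str)
def buildCandidates (default_next : Option String) (visible_str : Option String) : List String :=
  (match default_next with
    | some d => if d ≠ "" then [d] else []
    | none => []) ++
  (match visible_str with
    | some v =>
        if v ≠ "" then
          (((PySem.Str.split? v ",").getD []).map PySem.Str.strip).filter (fun s => s ≠ "")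
        else []
    | none => [])

-- sort key: Python compares int-or-inf; exactly the lexicographic pair (is-inf, value)
def trackKey (t : Option Int) : Lex (Bool × Int) := toLex (t.isNone, t.getD 0)

-- A's final loop: first candidate whose status (default "free") is "free"
def firstFree (d : PySem.Dict String String) : List String → Option String
  | [] => none
  | c :: rest => if PySem.Dict.getD d c "free" == "free" then some c else firstFree d rest

def select_next_segment (default_next : Option String) (visible_str : Option String) (field_status : List (String × String)) : Option String :=
  let candidates := PySem.List.dedup (buildCandidates default_next visible_str)
  firstFree (PySem.Dict.mk field_status)
    (PySem.List.sorted candidates (fun x => trackKey (extract_track x)) false)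

-- ===== PORT B =====
-- Python's `track < best_track` on int-or-inf values (none = inf)
def ltTrack : Option Int → Option Int → Bool
  | some a, some b => decide (a < b)
  | some _, none => true
  | none, _ => false

-- one step of B's loop: keep (best, best_track)
def considerB (d : PySem.Dict String String) (st : Option (String × Option Int)) (c : String) : Option (String × Option Int) :=
  if PySem.Dict.getD d c "free" == "free" then
    let t := extract_track c
    match st with
    | none => some (c, t)
    | some (b, bt) => if ltTrack t bt then some (c, t) else some (b, bt)
  else st

def select_next_segment_alt (default_next : Option String) (visible_str : Option String) (field_status : List (String × String)) : Option String :=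
  ((PySem.List.dedup (buildCandidates default_next visible_str)).foldl
      (considerB (PySem.Dict.mk field_status)) none).map (·.1)

-- ===== PRECONDITION & SPEC =====
def Spec_select_next_segment (default_next : Option String) (visible_str : Option String) (field_status : List (String × String)) (out : Option String) : Prop := out = select_next_segment_alt default_next visible_str field_status
instance (default_next : Option String) (visible_str : Option String) (field_status : List (String × String)) (out : Option String) : Decidable (Spec_select_next_segment default_next visible_str field_status out) := by unfold Spec_select_next_segment; infer_instance

-- ===== CLAIM (what is proved, stated in full; the proofs are below) =====
def Claim_equal_select_next_segment : Prop := ∀ (default_next : Option String) (visible_str : Option String) (field_status : List (String × String)), Dom_select_next_segment default_next visible_str field_status → Spec_select_next_segment default_next visible_str field_status (select_next_segment default_next visible_str field_status)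

-- ===== LEMMAS AND PROOFS =====

-- A's scan is List.find? on the free predicate
theorem firstFree_eq_find? (d : PySem.Dict String String) (l : List String) :
    firstFree d l = l.find? (fun c => PySem.Dict.getD d c "free" == "free") := by
  induction l with
  | nil => rfl
  | cons c rest ih =>
      by_cases h : (PySem.Dict.getD d c "free" == "free") = true <;>
        simp [firstFree, List.find?, h, ih]

-- B's comparison agrees with the sort key's order
theorem ltTrack_eq (t1 t2 : Option Int) :
    ltTrack t1 t2 = decide (trackKey t1 < trackKey t2) := by
  cases t1 <;> cases t2 <;>
    simp [ltTrack, trackKey, Prod.Lex.toLex_lt_toLex]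

-- find? over a stable insertion into a key-sorted list
theorem find?_insertBy (p : String → Bool) (k : String → Lex (Bool × Int)) (x : String)
    (ys : List String) (hs : ys.Pairwise (fun a b => k a ≤ k b)) :
    (PySem.List.insertBy (fun a b => decide (k a < k b)) x ys).find? p =
      match ys.find? p with
      | none => if p x then some x else none
      | some c => if p x && decide (k x < k c) then some x else some c := by
  induction ys with
  | nil =>
      by_cases hx : p x = true <;> simp [PySem.List.insertBy, List.find?, hx]
  | cons y ys ih =>
      rw [List.pairwise_cons] at hs
      by_cases hlt : k x < k y
      · -- x is inserted in front
        have hfront : (PySem.List.insertBy (fun a b => decide (k a < k b)) x (y :: ys)) =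
            x :: y :: ys := by simp [PySem.List.insertBy, hlt]
        rw [hfront]
        by_cases hx : p x = true
        · -- result is x; on the RHS k x < k c for any found c since k y ≤ k c
          cases hc : (y :: ys).find? p with
          | none => simp [List.find?, hx]
          | some c =>
              have hmem : c ∈ y :: ys := List.mem_of_find?_eq_some hc
              have hyc : k y ≤ k c := by
                rcases List.mem_cons.mp hmem with rfl | hm
                · exact le_refl _
                · exact hs.1 c hm
              have : k x < k c := lt_of_lt_of_le hlt hyc
              simp [List.find?, hx, this]
        · have hskip : List.find? p (x :: y :: ys) = List.find? p (y :: ys) := by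
            simp [List.find?, hx]
          rw [hskip]
          cases hc : (y :: ys).find? p <;> simp [hx]
      · -- x goes after y
        have hrest : (PySem.List.insertBy (fun a b => decide (k a < k b)) x (y :: ys)) =
            y :: PySem.List.insertBy (fun a b => decide (k a < k b)) x ys := by
          simp [PySem.List.insertBy, hlt]
        rw [hrest]
        by_cases hy : p y = true
        · -- found y immediately on both sides; ¬(k x < k y) kills the swap condition
          simp [List.find?, hy, hlt]
        · simp only [List.find?, hy]
          rw [ih hs.2]

-- the main invariant, by induction on the candidate list from the right
theorem main_inv (d : PySem.Dict String String) (l : List String) :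
    (PySem.List.sorted l (fun x => trackKey (extract_track x)) false).find?
        (fun c => PySem.Dict.getD d c "free" == "free") =
      (l.foldl (considerB d) none).map (·.1) ∧
    (∀ c t, l.foldl (considerB d) none = some (c, t) → t = extract_track c) := by
  induction l using List.reverseRecOn with
  | nil => exact ⟨rfl, by intro c t h; simp [List.foldl] at h⟩
  | append_singleton l x ih =>
      obtain ⟨ih1, ih2⟩ := ih
      have hsort : PySem.List.sorted (l ++ [x]) (fun x => trackKey (extract_track x)) false =
          PySem.List.insertBy
            (fun a b => decide (trackKey (extract_track a) < trackKey (extract_track b))) x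
            (PySem.List.sorted l (fun x => trackKey (extract_track x)) false) := by
        rw [PySem.List.sorted_eq_foldl_insertBy, PySem.List.sorted_eq_foldl_insertBy,
          List.foldl_append]
        rfl
      have hfold : (l ++ [x]).foldl (considerB d) none =
          considerB d (l.foldl (considerB d) none) x := by rw [List.foldl_append]; rfl
      have hpair := PySem.List.sorted_pairwise l (fun x => trackKey (extract_track x))
      rw [hsort, hfold,
        find?_insertBy (fun c => PySem.Dict.getD d c "free" == "free")
          (fun x => trackKey (extract_track x)) x _ hpair]
      by_cases hx : (PySem.Dict.getD d x "free" == "free") = true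
      · cases hst : l.foldl (considerB d) none with
        | none =>
            rw [hst] at ih1
            simp only [Option.map_none] at ih1
            rw [ih1]
            constructor
            · simp [considerB, hx]
            · intro c t h
              simp [considerB, hx] at h
              rw [← h.2, h.1]
        | some bt =>
            obtain ⟨b, btv⟩ := bt
            rw [hst] at ih1 ih2
            have hbt : btv = extract_track b := ih2 b btv rfl
            simp only [Option.map_some] at ih1
            rw [ih1]
            constructor
            · by_cases hcmp : ltTrack (extract_track x) btv = true
              · have : decide (trackKey (extract_track x) < trackKey (extract_track b)) = true := by
                  rw [← ltTrack_eq, ← hbt]; exact hcmp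
                simp [considerB, hx, hcmp, this]
              · have : decide (trackKey (extract_track x) < trackKey (extract_track b)) = false := by
                  rw [← ltTrack_eq, ← hbt]; simpa using hcmp
                simp [considerB, hx, hcmp, this]
            · intro c t h
              simp only [considerB, hx, if_pos] at h
              by_cases hcmp : ltTrack (extract_track x) btv = true <;>
                simp [hcmp] at h
              · rw [← h.2, h.1]
              · rw [← h.2, ← h.1]; exact hbt
      · cases hst : l.foldl (considerB d) none with
        | none =>
            rw [hst] at ih1
            simp only [Option.map_none] at ih1
            rw [ih1]
            exact ⟨by simp [considerB, hx], by intro c t h; simp [considerB, hx] at h⟩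
        | some bt =>
            obtain ⟨b, btv⟩ := bt
            rw [hst] at ih1 ih2
            simp only [Option.map_some] at ih1
            rw [ih1]
            constructor
            · simp [considerB, hx]
            · intro c t h
              simp only [considerB, hx] at h
              exact ih2 c t (by simpa using h)

-- ===== VERDICT (by name: the statement is the Claim_ definition above) =====
theorem select_next_segment_spec : Claim_equal_select_next_segment := by
  intro default_next visible_str field_status _
  unfold Spec_select_next_segment select_next_segment select_next_segment_alt
  rw [firstFree_eq_find?]
  exact (main_inv (PySem.Dict.mk field_status)
    (PySem.List.dedup (buildCandidates default_next visible_str))).1
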